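-- pv_equiv track=rewrite | github.com/JacquesLucke/animation_nodes | nodes/list/list_boolean_operations.py | execute_Difference
-- ===== SOURCE A (Python) =====
-- def execute_Difference(list1, list2):
--     outList = []
--     append = outList.append
--     for element in list1:
--         if element not in outList:
--             if element not in list2:
--                 append(element)
--     return outList
-- ===== SOURCE B (Python) =====
-- def execute_Difference(list1, list2):
--     # Recursive "nub" decomposition: dedup is achieved by deleting all copies
--     # of the head from the remainder before recursing, so no seen-set or
--     # output-membership test is ever needed.
--     if not list1:
--         return []
--     x = list1[0]
--     rest = execute_Difference([y for y in list1[1:] if y != x], list2)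
--     return rest if x in list2 else [x] + rest
-- ===== Notes on version B (the rewrite author's own statement) =====
-- stated objective: alternative
-- what changed: Replaces A's single accumulator loop with membership tests against the growing output by a structural recursion that filters all duplicates of the head out of the tail before recursing (classic nub), so no seen-collection or output-membership test exists.
import Mathlib
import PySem

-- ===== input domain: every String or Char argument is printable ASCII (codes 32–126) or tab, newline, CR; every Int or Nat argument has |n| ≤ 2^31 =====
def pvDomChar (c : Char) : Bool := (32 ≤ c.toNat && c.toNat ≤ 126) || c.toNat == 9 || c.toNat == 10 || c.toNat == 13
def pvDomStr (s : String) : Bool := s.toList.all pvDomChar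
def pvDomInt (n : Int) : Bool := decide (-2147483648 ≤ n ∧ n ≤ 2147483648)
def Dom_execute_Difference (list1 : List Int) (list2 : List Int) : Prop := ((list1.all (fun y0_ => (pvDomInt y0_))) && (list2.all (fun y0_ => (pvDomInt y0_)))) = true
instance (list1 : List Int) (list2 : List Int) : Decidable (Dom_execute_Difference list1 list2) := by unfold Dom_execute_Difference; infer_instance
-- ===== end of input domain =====

-- B replaces A's accumulator loop (membership tests against the growing output) by a
-- structural "nub" recursion that filters duplicates of the head out of the tail (alternative).

-- ===== PORT A =====
def execute_Difference (list1 : List Int) (list2 : List Int) : List Int :=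
  list1.foldl (fun outList element =>
    if outList.contains element then outList
    else if list2.contains element then outList
    else outList ++ [element]) []

-- ===== PORT B =====
def execute_Difference_alt : List Int → List Int → List Int
  | [], _ => []
  | x :: xs, list2 =>
    let rest := execute_Difference_alt (xs.filter (fun y => y ≠ x)) list2
    if list2.contains x then rest else x :: rest
termination_by l1 _ => l1.length
decreasing_by
  simp only [List.length_unattach]
  exact Nat.lt_succ_of_le ((List.length_filter_le _ _).trans (List.length_attach (l := xs)).le)

-- ===== PRECONDITION & SPEC =====
def Spec_execute_Difference (list1 : List Int) (list2 : List Int) (out : List Int) : Prop := out = execute_Difference_alt list1 list2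
instance (list1 : List Int) (list2 : List Int) (out : List Int) : Decidable (Spec_execute_Difference list1 list2 out) := by unfold Spec_execute_Difference; infer_instance

-- ===== CLAIM (what is proved, stated in full; the proofs are below) =====
def Claim_equal_execute_Difference : Prop := ∀ (list1 : List Int) (list2 : List Int), Dom_execute_Difference list1 list2 → Spec_execute_Difference list1 list2 (execute_Difference list1 list2)

-- ===== LEMMAS AND PROOFS =====

-- A's loop abstracted: first occurrences of l1 not in `seen` and not in l2
def pvGo (l2 : List Int) : List Int → List Int → List Int
  | [], _ => []
  | x :: xs, seen =>
    if seen.contains x || l2.contains x then pvGo l2 xs seen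
    else x :: pvGo l2 xs (seen ++ [x])

theorem pvA_loop (l2 : List Int) (l1 : List Int) (out : List Int) :
    l1.foldl (fun outList element =>
      if outList.contains element then outList
      else if l2.contains element then outList
      else outList ++ [element]) out = out ++ pvGo l2 l1 out := by
  induction l1 generalizing out with
  | nil => simp [pvGo]
  | cons x xs ih =>
    rw [List.foldl_cons, ih]
    by_cases hx : x ∈ out
    · simp [pvGo, hx]
    · by_cases h2 : x ∈ l2
      · simp [pvGo, hx, h2]
      · simp [pvGo, hx, h2]

theorem pvGo_seen_congr (l2 : List Int) (l1 : List Int) (s s' : List Int)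
    (h : ∀ y, y ∉ l2 → (y ∈ s ↔ y ∈ s')) : pvGo l2 l1 s = pvGo l2 l1 s' := by
  induction l1 generalizing s s' with
  | nil => simp [pvGo]
  | cons x xs ih =>
    by_cases h2 : x ∈ l2
    · simp only [pvGo, List.contains_eq_mem, h2, decide_true, Bool.or_true, if_true]
      exact ih s s' h
    · have hmem : (x ∈ s) = (x ∈ s') := propext (h x h2)
      by_cases hx : x ∈ s
      · have hx' : x ∈ s' := (h x h2).mp hx
        simp only [pvGo, List.contains_eq_mem, hx, hx', decide_true, Bool.true_or, if_true]
        exact ih s s' h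
      · have hx' : x ∉ s' := fun hc => hx ((h x h2).mpr hc)
        simp only [pvGo, List.contains_eq_mem, hx, hx', h2, decide_false, Bool.or_self,
          Bool.false_eq_true, if_false]
        refine congrArg _ (ih (s ++ [x]) (s' ++ [x]) ?_)
        intro y hy
        simp only [List.mem_append, List.mem_singleton]
        rw [h y hy]

theorem pvGo_eq_alt (l2 : List Int) (l1 seen : List Int) :
    pvGo l2 l1 seen = execute_Difference_alt (l1.filter (fun y => !seen.contains y)) l2 := by
  induction l1 generalizing seen with
  | nil => simp [pvGo, execute_Difference_alt]
  | cons x xs ih =>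
    by_cases hs : x ∈ seen
    · have : pvGo l2 (x :: xs) seen = pvGo l2 xs seen := by simp [pvGo, hs]
      rw [this, ih seen]
      simp [hs]
    · by_cases h2 : x ∈ l2
      · have hA : pvGo l2 (x :: xs) seen = pvGo l2 xs (seen ++ [x]) := by
          rw [show pvGo l2 (x :: xs) seen = pvGo l2 xs seen by simp [pvGo, h2]]
          exact pvGo_seen_congr l2 xs seen (seen ++ [x])
            (fun y hy => by
              simp only [List.mem_append, List.mem_singleton]
              constructor
              · exact Or.inl
              · rintro (h' | rfl)
                · exact h'
                · exact absurd h2 hy)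
        rw [hA, ih (seen ++ [x])]
        rw [List.filter_cons]
        simp only [hs, List.contains_eq_mem, decide_false, Bool.not_false, if_true]
        rw [execute_Difference_alt.eq_2]
        simp only [List.contains_eq_mem, h2, decide_true, if_true]
        have hfuse : List.filter (fun y => !decide (y ∈ seen ++ [x])) xs
            = List.filter (fun a => decide (a ≠ x) && !decide (a ∈ seen)) xs := by
          apply List.filter_congr
          intro y _
          by_cases hy : y = x <;> by_cases hys : y ∈ seen <;> simp [hy, hys]
        rw [List.filter_filter, hfuse]
      · have hA : pvGo l2 (x :: xs) seen = x :: pvGo l2 xs (seen ++ [x]) := by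
          simp [pvGo, hs, h2]
        rw [hA, ih (seen ++ [x])]
        rw [List.filter_cons]
        simp only [hs, List.contains_eq_mem, decide_false, Bool.not_false, if_true]
        rw [execute_Difference_alt.eq_2]
        simp only [List.contains_eq_mem, h2, decide_false, Bool.false_eq_true, if_false]
        have hfuse : List.filter (fun y => !decide (y ∈ seen ++ [x])) xs
            = List.filter (fun a => decide (a ≠ x) && !decide (a ∈ seen)) xs := by
          apply List.filter_congr
          intro y _
          by_cases hy : y = x <;> by_cases hys : y ∈ seen <;> simp [hy, hys]
        rw [List.filter_filter, hfuse]

-- ===== VERDICT (by name: the statement is the Claim_ definition above) =====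
theorem execute_Difference_spec : Claim_equal_execute_Difference := by
  intro list1 list2 _
  show execute_Difference list1 list2 = execute_Difference_alt list1 list2
  rw [execute_Difference, pvA_loop, pvGo_eq_alt]
  simp
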